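-- pv_equiv track=rewrite | github.com/Sadfahlsdj/ds4200-project | sankey_functions.py | clear_low_values
-- ===== SOURCE A (Python) =====
-- def clear_low_values(dict, n):
--     """
--     input: dictionary dict, an int n
--     output: the same dict, but with any values below n removed
--     """
--     keys_to_pop = []
--     for key, value in dict.items():
--         if value < n:
--             keys_to_pop.append(key)
--
--     for k in keys_to_pop:
--         dict.pop(k)
--     # need to pop keys all at once later because popping while iterating is no good
--
--     return dict
-- ===== SOURCE B (Python) =====
-- def clear_low_values(dict, n):
--     """
--     input: dictionary dict, an int n
--     output: the same dict, but with any values below n removed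
--     """
--     # Repeated scan-and-delete: find one offending entry, delete it, restart,
--     # until a full scan finds none. No auxiliary key list is ever built.
--     while True:
--         for k, v in dict.items():
--             if v < n:
--                 del dict[k]
--                 break
--         else:
--             return dict
-- ===== Notes on version B (the rewrite author's own statement) =====
-- stated objective: alternative
-- what changed: B never builds A's keys_to_pop list: it repeatedly scans the dict for one entry below n, deletes it and restarts the scan, returning when a full scan finds none (fixed-point deletion instead of collect-then-pop).
import Mathlib
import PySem

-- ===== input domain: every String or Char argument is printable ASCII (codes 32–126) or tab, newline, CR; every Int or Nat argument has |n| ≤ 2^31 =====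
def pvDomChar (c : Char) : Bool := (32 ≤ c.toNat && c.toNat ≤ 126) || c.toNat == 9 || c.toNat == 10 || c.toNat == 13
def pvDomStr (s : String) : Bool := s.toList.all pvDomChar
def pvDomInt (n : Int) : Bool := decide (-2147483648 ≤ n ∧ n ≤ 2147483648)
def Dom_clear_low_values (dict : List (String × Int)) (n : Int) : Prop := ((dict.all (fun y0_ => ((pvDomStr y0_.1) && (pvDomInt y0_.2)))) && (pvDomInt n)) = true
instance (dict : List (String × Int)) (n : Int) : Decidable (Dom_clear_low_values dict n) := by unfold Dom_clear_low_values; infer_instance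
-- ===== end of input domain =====

-- B replaces A's collect-keys-then-pop passes with repeated scan-and-delete-one until a fixed point (no key list built); alternative decomposition, not faster.


-- ===== PORT A =====
-- keys_to_pop = []; for key, value in dict.items(): if value < n: keys_to_pop.append(key)
-- then for k in keys_to_pop: dict.pop(k)  (pop of a present key = drop the pair with that key)
def clear_low_values (dict : List (String × Int)) (n : Int) : List (String × Int) :=
  let keys_to_pop := dict.foldl (fun acc kv => if kv.2 < n then acc ++ [kv.1] else acc) ([] : List String)
  keys_to_pop.foldl (fun d k => d.filter (fun p => !(p.1 == k))) dict

-- ===== PORT B =====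
-- while True: scan dict for the first (k, v) with v < n; if found, del dict[k]
-- (remove the first entry keyed k) and restart the scan; if a full scan finds none, return dict.
def clear_low_values_alt (dict : List (String × Int)) (n : Int) : List (String × Int) :=
  match hf : dict.find? (fun kv => decide (kv.2 < n)) with
  | none => dict
  | some kv =>
      clear_low_values_alt (dict.eraseP (fun p => p.1 == kv.1)) n
termination_by dict.length
decreasing_by
  have hmem := List.mem_of_find?_eq_some hf
  have hlt : 0 < dict.length := List.length_pos_of_mem hmem
  have := List.length_eraseP_of_mem (p := fun p : String × Int => p.1 == kv.1) hmem
    (by simp)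
  omega

-- ===== PRECONDITION & SPEC =====
-- Pre_ requires distinct keys: the argument models a Python dict, and an association list with a
-- duplicated key does not represent any Python dict (no actual input of A is excluded).
def Pre_clear_low_values (dict : List (String × Int)) (n : Int) : Prop :=
  (dict.map Prod.fst).Nodup
instance (dict : List (String × Int)) (n : Int) : Decidable (Pre_clear_low_values dict n) := by unfold Pre_clear_low_values; infer_instance

def pvWitness_clear_low_values : (List (String × Int)) × Int := ([("a", 1), ("b", 5)], 3)

def Spec_clear_low_values (dict : List (String × Int)) (n : Int) (out : List (String × Int)) : Prop := out = clear_low_values_alt dict n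
instance (dict : List (String × Int)) (n : Int) (out : List (String × Int)) : Decidable (Spec_clear_low_values dict n out) := by unfold Spec_clear_low_values; infer_instance

-- ===== CLAIM (what is proved, stated in full; the proofs are below) =====
def Claim_equal_clear_low_values : Prop := ∀ (dict : List (String × Int)) (n : Int), Dom_clear_low_values dict n → Pre_clear_low_values dict n → Spec_clear_low_values dict n (clear_low_values dict n)

-- ===== LEMMAS AND PROOFS =====

-- A's second pass: popping each key of ks in turn is one filter by "key not in ks".
theorem foldl_pop_eq_filter (ks : List String) (d : List (String × Int)) :
    ks.foldl (fun d k => d.filter (fun p => !(p.1 == k))) d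
      = d.filter (fun p => !ks.contains p.1) := by
  induction ks generalizing d with
  | nil => simp
  | cons k ks ih =>
      simp only [List.foldl_cons, ih, List.filter_filter]
      apply List.filter_congr
      intro p _
      cases hk : p.1 == k <;> simp_all [Bool.and_comm]

-- A computes the one-pass filter of the retained entries (under distinct keys).
theorem clear_low_values_eq_filter (d : List (String × Int)) (n : Int)
    (hpre : (d.map Prod.fst).Nodup) :
    clear_low_values d n = d.filter (fun p => !decide (p.2 < n)) := by
  unfold clear_low_values
  rw [PySem.List.foldl_append_ite (p := fun kv : String × Int => kv.2 < n) (f := Prod.fst),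
      List.nil_append, foldl_pop_eq_filter]
  apply List.filter_congr
  intro p hp
  have : ((List.filter (fun x : String × Int => decide (x.2 < n)) d).map Prod.fst).contains p.1
      = decide (p.2 < n) := by
    by_cases h : p.2 < n
    · simp only [h, decide_true]
      simp only [List.contains_eq_mem]
      exact decide_eq_true (List.mem_map.2 ⟨p, List.mem_filter.2 ⟨hp, by simpa using h⟩, rfl⟩)
    · simp only [h, decide_false]
      apply Bool.eq_false_iff.2
      intro hc
      have hc' : ∃ x, (p.1, x) ∈ d ∧ x < n := by simpa using hc
      rcases hc' with ⟨v, hv, hvn⟩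
      have heq := List.inj_on_of_nodup_map hpre hv hp rfl
      have hv2 : v = p.2 := congrArg Prod.snd heq
      exact h (hv2 ▸ hvn)
  rw [this]

-- B's fixed-point deletion also computes that filter (under distinct keys).
theorem clear_low_values_alt_eq_filter (d : List (String × Int)) (n : Int)
    (hpre : (d.map Prod.fst).Nodup) :
    clear_low_values_alt d n = d.filter (fun p => !decide (p.2 < n)) := by
  induction hlen : d.length using Nat.strong_induction_on generalizing d with
  | _ m ih =>
  unfold clear_low_values_alt
  split
  · next hf =>
      symm
      apply List.filter_eq_self.2
      intro p hp
      have := List.find?_eq_none.1 hf p hp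
      simpa using this
  · next kv hf =>
      have hmem := List.mem_of_find?_eq_some hf
      have hlow : kv.2 < n := by have := List.find?_some hf; simpa using this
      obtain ⟨a, l₁, l₂, hnone, hpa, hd, herase⟩ :=
        List.exists_of_eraseP (p := fun p : String × Int => p.1 == kv.1) hmem (by simp)
      -- under distinct keys, the erased entry a (same key as kv, both in d) is kv itself
      have ha : a = kv := by
        have ha1 : a.1 = kv.1 := by simpa using hpa
        have hamem : a ∈ d := hd ▸ (List.mem_append.2 (Or.inr (List.mem_cons_self)))
        exact List.inj_on_of_nodup_map hpre hamem hmem ha1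
      have hsub : (d.eraseP (fun p => p.1 == kv.1)).Sublist d := List.eraseP_sublist
      have hpre' : ((d.eraseP (fun p => p.1 == kv.1)).map Prod.fst).Nodup :=
        hpre.sublist (hsub.map Prod.fst)
      have hlt : (d.eraseP (fun p => p.1 == kv.1)).length < m := by
        have := List.length_eraseP_of_mem (p := fun p : String × Int => p.1 == kv.1) hmem (by simp)
        have hpos : 0 < d.length := List.length_pos_of_mem hmem
        omega
      rw [ih _ hlt _ hpre' rfl, herase, hd]
      subst ha
      simp [List.filter_append, hlow]

-- ===== VERDICT (by name: the statement is the Claim_ definition above) =====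

theorem clear_low_values_spec : Claim_equal_clear_low_values := by
  intro dict n _ hpre
  unfold Spec_clear_low_values
  rw [clear_low_values_eq_filter dict n hpre, clear_low_values_alt_eq_filter dict n hpre]
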